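-- pv_equiv track=rewrite | github.com/Nxn4686/Python_Lunev | HW5/smartBOT.py | bot_move
-- ===== SOURCE A (Python) =====
-- def bot_move(candy):
--     count = 0
--     if candy % 28 == 0 and candy > 56:
--         k = 27
--     elif candy <= 56 and candy > 28:
--         k = candy - 29
--     elif candy <= 28:
--         k = candy
--     else:
--         while candy % 28 != 0:
--             candy -= 1
--             count += 1
--
--         k = count
--     return k
-- ===== SOURCE B (Python) =====
-- def bot_move(candy):
--     if candy <= 28:
--         return candy
--     if candy <= 56:
--         return candy - 29
--     r = candy % 28
--     return 27 if r == 0 else r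
-- ===== Notes on version B (the rewrite author's own statement) =====
-- stated objective: simpler
-- what changed: Replaces the repeated-subtraction counting while-loop with the direct closed form candy % 28 (keeping the small-candy and divisible-by-28 branches), so B is loop-free.
import Mathlib
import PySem

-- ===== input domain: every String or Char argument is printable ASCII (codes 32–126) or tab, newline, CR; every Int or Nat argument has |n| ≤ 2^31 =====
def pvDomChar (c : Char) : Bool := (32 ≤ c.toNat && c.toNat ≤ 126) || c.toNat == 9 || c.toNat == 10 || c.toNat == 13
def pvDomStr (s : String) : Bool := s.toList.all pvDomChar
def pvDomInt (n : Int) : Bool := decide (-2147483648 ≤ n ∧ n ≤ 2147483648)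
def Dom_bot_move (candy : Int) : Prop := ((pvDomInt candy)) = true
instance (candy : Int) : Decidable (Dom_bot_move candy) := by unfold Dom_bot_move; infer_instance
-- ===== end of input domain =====

-- B replaces A's repeated-subtraction counting loop with the closed form candy % 28 (loop-free); objective: simpler.


-- ===== PORT A =====
-- A's while-loop: decrement candy, increment count, until candy % 28 == 0.
-- fuel is only a totality guard: (mod candy 28).toNat + 1 steps always suffice,
-- since Python's mod with positive divisor is nonnegative and drops by 1 each step.
def botMoveLoop (fuel : Nat) (candy count : Int) : Int :=
  match fuel with
  | 0 => count
  | fuel + 1 =>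
    if PySem.Int.mod candy 28 = 0 then count
    else botMoveLoop fuel (candy - 1) (count + 1)

def bot_move (candy : Int) : Int :=
  if PySem.Int.mod candy 28 = 0 ∧ candy > 56 then 27
  else if candy ≤ 56 ∧ candy > 28 then candy - 29
  else if candy ≤ 28 then candy
  else botMoveLoop ((PySem.Int.mod candy 28).toNat + 1) candy 0

-- ===== PORT B =====
def bot_move_alt (candy : Int) : Int :=
  if candy ≤ 28 then candy
  else if candy ≤ 56 then candy - 29
  else
    let r := PySem.Int.mod candy 28
    if r = 0 then 27 else r

-- ===== PRECONDITION & SPEC =====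
def Spec_bot_move (candy : Int) (out : Int) : Prop := out = bot_move_alt candy
instance (candy : Int) (out : Int) : Decidable (Spec_bot_move candy out) := by unfold Spec_bot_move; infer_instance

-- ===== CLAIM (what is proved, stated in full; the proofs are below) =====
def Claim_equal_bot_move : Prop := ∀ (candy : Int), Dom_bot_move candy → Spec_bot_move candy (bot_move candy)

-- ===== LEMMAS AND PROOFS =====
-- Loop invariant: with enough fuel the loop returns count + candy % 28.
theorem botMoveLoop_eq (fuel : Nat) (candy count : Int)
    (hf : (PySem.Int.mod candy 28).toNat < fuel) :
    botMoveLoop fuel candy count = count + PySem.Int.mod candy 28 := by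
  induction fuel generalizing candy count with
  | zero => omega
  | succ m ih =>
    have hpos : (0:Int) < 28 := by norm_num
    have h1 := PySem.Int.mod_eq_emod_of_pos (a := candy) (b := 28) hpos
    have hge := Int.emod_nonneg candy (by norm_num : (28:Int) ≠ 0)
    by_cases h : PySem.Int.mod candy 28 = 0
    · rw [botMoveLoop, if_pos h, h]; omega
    · have h2 := PySem.Int.mod_eq_emod_of_pos (a := candy - 1) (b := 28) hpos
      have hlt := Int.emod_lt_of_pos candy hpos
      have hstep : (candy - 1) % 28 = candy % 28 - 1 := by rw [h1] at h; omega
      have hm : (PySem.Int.mod (candy - 1) 28).toNat < m := by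
        rw [h2, hstep]; rw [h1] at h hf; omega
      rw [botMoveLoop, if_neg h, ih (candy - 1) (count + 1) hm, h1, h2, hstep]
      omega

-- ===== VERDICT (by name: the statement is the Claim_ definition above) =====
theorem bot_move_spec : Claim_equal_bot_move := by
  intro candy _
  unfold Spec_bot_move bot_move bot_move_alt
  have hpos : (0:Int) < 28 := by norm_num
  have h1 := PySem.Int.mod_eq_emod_of_pos (a := candy) (b := 28) hpos
  rw [botMoveLoop_eq _ candy 0 (by omega)]
  simp only [h1]
  split_ifs <;> omega
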